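-- pv_equiv track=rewrite | github.com/amcgavin/advent-of-code | 2023/python/14.py | part_1
-- ===== SOURCE A (Python) =====
-- from collections import defaultdict
--
-- def part_1(data):
--     grid = {}
--     for y, line in enumerate(data):
--         for x, c in enumerate(line):
--             grid[(x, y)] = c
--
--     score = 0
--     columns = defaultdict(lambda: 0)
--     for y in range(len(data)):
--         for x in range(len(data[0])):
--             if grid[(x, y)] == "#":
--                 columns[x] = y + 1
--             elif grid[(x, y)] == "O":
--                 score += len(data) - columns[x]
--                 columns[x] += 1
--
--     return score
-- ===== SOURCE B (Python) =====
-- def segment_load(rocks, H, start):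
--     # rocks roll to rows start .. start+rocks-1: closed-form arithmetic series
--     return rocks * H - rocks * start - rocks * (rocks - 1) // 2
--
-- def column_load(col, H, start):
--     # load of one column: group the rocks per '#'-separated segment
--     if '#' not in col:
--         return segment_load(col.count('O'), H, start)
--     i = col.index('#')
--     return segment_load(col[:i].count('O'), H, start) + column_load(col[i + 1:], H, start + i + 1)
--
-- def part_1(data):
--     if not data:
--         return 0
--     H = len(data)
--     total = 0
--     for x in range(len(data[0])):
--         column = [data[y][x] for y in range(H)]
--         total += column_load(column, H, 0)
--     return total
-- ===== Notes on version B (the rewrite author's own statement) =====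
-- stated objective: faster
-- what changed: Replaces A's row-major sweep over an (x,y)->char dict with per-column rolling counters by a column-major pass that splits each column into '#'-separated segments and adds each segment's load with a closed-form arithmetic-series formula; no dict is built, so the constant factor drops sharply.
import Mathlib
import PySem

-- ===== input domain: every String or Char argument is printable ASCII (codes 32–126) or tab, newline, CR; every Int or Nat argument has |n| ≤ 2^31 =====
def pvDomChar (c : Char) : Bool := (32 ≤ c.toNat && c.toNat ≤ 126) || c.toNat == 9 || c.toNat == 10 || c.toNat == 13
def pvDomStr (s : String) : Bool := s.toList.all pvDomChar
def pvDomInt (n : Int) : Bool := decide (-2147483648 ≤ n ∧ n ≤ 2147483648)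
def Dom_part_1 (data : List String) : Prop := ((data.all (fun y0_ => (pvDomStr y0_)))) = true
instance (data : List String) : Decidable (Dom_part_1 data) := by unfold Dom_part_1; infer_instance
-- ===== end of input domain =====

-- B replaces A's row-major sweep over an (x,y)→char dict by a column-major pass that groups each
-- column's rocks per '#'-separated segment and adds each segment's load in closed form (no dict,
-- measurably faster by a constant factor).

-- ===== PORT A =====
def part_1 (data : List String) : Int :=
  let grid : PySem.Dict (Int × Int) Char :=
    (PySem.List.enumerate data).foldl
      (fun g yl =>
        (PySem.List.enumerate yl.2.toList).foldl
          (fun g xc => g.insert (xc.1, yl.1) xc.2) g)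
      PySem.Dict.empty
  let res :=
    (PySem.List.pyRange 0 (data.length : Int)).foldl
      (fun (st : Int × PySem.Dict Int Int) y =>
        (PySem.List.pyRange 0 (PySem.Str.len (PySem.List.pyGetD data 0 ""))).foldl
          (fun st x =>
            let c := (grid.get? (x, y)).getD ' '   -- KeyError excluded by Pre_part_1
            if c = '#' then (st.1, st.2.insert x (y + 1))
            else if c = 'O' then
              (st.1 + (data.length : Int) - st.2.getD x 0, st.2.insert x (st.2.getD x 0 + 1))
            else st)
          st)
      (0, PySem.Dict.empty)
  res.1

-- ===== PORT B =====
def segment_load (rocks H start : Int) : Int :=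
  rocks * H - rocks * start - PySem.Int.floordiv (rocks * (rocks - 1)) 2

-- termination helper for column_load (the tail after the first '#' is shorter)
theorem pv_slice_after_index_lt (col : List Char) (i : Nat)
    (h : PySem.List.index? col '#' = some i) :
    (PySem.List.slice col (some ((i : Int) + 1)) none).length < col.length := by
  obtain ⟨pre, suf, hcol, hlen, -⟩ := (PySem.List.index?_eq_some_iff col '#' i).mp h
  have h0 : (0:Int) ≤ (i : Int) + 1 := by positivity
  rw [PySem.List.slice_from col h0, List.length_drop]
  have : i < col.length := by subst hcol; simp [← hlen]
  omega

def column_load (col : List Char) (H start : Int) : Int :=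
  match h : PySem.List.index? col '#' with
  | none => segment_load ((PySem.List.count col 'O' : Int)) H start
  | some i =>
      segment_load ((PySem.List.count (PySem.List.slice col none (some (i : Int))) 'O' : Int)) H start
        + column_load (PySem.List.slice col (some ((i : Int) + 1)) none) H (start + (i : Int) + 1)
termination_by col.length
decreasing_by exact pv_slice_after_index_lt col i h

def part_1_alt (data : List String) : Int :=
  if data = [] then 0
  else
    let H : Int := data.length
    (PySem.List.pyRange 0 (PySem.Str.len (PySem.List.pyGetD data 0 ""))).foldl
      (fun total x =>
        let column := (PySem.List.pyRange 0 H).map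
          (fun y => (PySem.Str.pyGet? (PySem.List.pyGetD data y "") x).getD ' ')
        total + column_load column H 0)
      0

-- ===== PRECONDITION & SPEC =====
-- Pre_ excludes ragged inputs where some row is shorter than row 0: there A raises KeyError
-- (and B raises IndexError); on everything else both return.
def Pre_part_1 (data : List String) : Prop :=
  ∀ line ∈ data, (data.headD "").length ≤ line.length
instance (data : List String) : Decidable (Pre_part_1 data) := by unfold Pre_part_1; infer_instance

def pvWitness_part_1 : List String := ["O#.", ".O#", "OO."]

def Spec_part_1 (data : List String) (out : Int) : Prop := out = part_1_alt data
instance (data : List String) (out : Int) : Decidable (Spec_part_1 data out) := by unfold Spec_part_1; infer_instance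

-- ===== CLAIM (what is proved, stated in full; the proofs are below) =====
def Claim_equal_part_1 : Prop := ∀ (data : List String), Dom_part_1 data → Pre_part_1 data → Spec_part_1 data (part_1 data)

-- ===== LEMMAS AND PROOFS =====

-- the character of column x, row y (exactly B's accessor)
def chAt (data : List String) (x y : Int) : Char :=
  (PySem.Str.pyGet? (PySem.List.pyGetD data y "") x).getD ' '

-- A's grid dict
def gridOf (data : List String) : PySem.Dict (Int × Int) Char :=
  (PySem.List.enumerate data).foldl
    (fun g yl =>
      (PySem.List.enumerate yl.2.toList).foldl
        (fun g xc => g.insert (xc.1, yl.1) xc.2) g)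
    PySem.Dict.empty

-- A's row width
def Wd (data : List String) : Int := PySem.Str.len (PySem.List.pyGetD data 0 "")

-- one cell of A's sweep: (score delta, new next-free slot) from (row y, char c, old slot v)
def onecell (H y : Int) (c : Char) (v : Int) : Int × Int :=
  if c = '#' then (0, y + 1) else if c = 'O' then (H - v, v + 1) else (0, v)

-- the body of A's inner (over x) loop
def xstep (g : PySem.Dict (Int × Int) Char) (H y : Int)
    (st : Int × PySem.Dict Int Int) (x : Int) : Int × PySem.Dict Int Int :=
  let c := (g.get? (x, y)).getD ' '
  if c = '#' then (st.1, st.2.insert x (y + 1))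
  else if c = 'O' then (st.1 + H - st.2.getD x 0, st.2.insert x (st.2.getD x 0 + 1))
  else st

-- A's processing of one row y
def rowBody (data : List String) (st : Int × PySem.Dict Int Int) (y : Int) :
    Int × PySem.Dict Int Int :=
  (PySem.List.pyRange 0 (Wd data)).foldl (xstep (gridOf data) (data.length : Int) y) st

theorem part_1_eq (data : List String) :
    part_1 data =
      ((PySem.List.pyRange 0 (data.length : Int)).foldl (rowBody data)
        (0, PySem.Dict.empty)).1 := rfl

-- A's per-column accumulation, replayed down one column
def cellFold (H : Int) : List Char → Int → Int → Int → Int × Int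
  | [], _, cnt, sc => (sc, cnt)
  | c :: rest, y, cnt, sc =>
    if c = '#' then cellFold H rest (y + 1) (y + 1) sc
    else if c = 'O' then cellFold H rest (y + 1) (cnt + 1) (sc + H - cnt)
    else cellFold H rest (y + 1) cnt sc

-- the first n cells of column x
def colOf (data : List String) (n : Nat) (x : Int) : List Char :=
  (PySem.List.pyRange 0 (n : Int)).map (fun y => chAt data x y)

-- load of c rocks stacked from slot cnt, as a sum
def runSum (H cnt : Int) : Nat → Int
  | 0 => 0
  | c + 1 => (H - cnt) + runSum H (cnt + 1) c

theorem runSum_eq_segment_load (H : Int) (c : Nat) :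
    ∀ cnt : Int, runSum H cnt c = segment_load (c : Int) H cnt := by
  induction c with
  | zero => intro cnt; simp [runSum, segment_load, PySem.Int.floordiv]
  | succ n ih =>
    intro cnt
    have h2 : ∀ m : Nat, PySem.Int.floordiv ((m : Int) * ((m : Int) - 1)) 2 = ((m * (m - 1)) / 2 : Nat) := by
      intro m
      cases m with
      | zero => simp [PySem.Int.floordiv]
      | succ k =>
        have h1 : ((k + 1 : Nat) : Int) * (((k + 1 : Nat) : Int) - 1) = (((k + 1) * k : Nat) : Int) := by
          push_cast; ring
        rw [PySem.Int.floordiv, h1, Int.fdiv_eq_ediv]; norm_num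
    have hT : ((n + 1) * n) / 2 = (n * (n - 1)) / 2 + n := by
      cases n with
      | zero => simp
      | succ k =>
        have h : (k + 2) * (k + 1) = (k + 1) * k + (k + 1) * 2 := by ring
        rw [h, Nat.add_mul_div_right _ _ (by norm_num)]
        simp
    simp only [runSum, ih (cnt + 1), segment_load, h2]
    push_cast [hT]
    ring

theorem cellFold_append (H : Int) (l1 l2 : List Char) :
    ∀ (y cnt sc : Int),
      cellFold H (l1 ++ l2) y cnt sc =
        cellFold H l2 (y + l1.length) (cellFold H l1 y cnt sc).2 (cellFold H l1 y cnt sc).1 := by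
  induction l1 with
  | nil => intro y cnt sc; simp [cellFold]
  | cons c rest ih =>
    intro y cnt sc
    simp only [List.cons_append, cellFold]
    split_ifs <;> rw [ih] <;> congr 1 <;> push_cast [List.length_cons] <;> omega
theorem cellFold_single (H y cnt sc : Int) (c : Char) :
    cellFold H [c] y cnt sc = (sc + (onecell H y c cnt).1, (onecell H y c cnt).2) := by
  simp only [cellFold, onecell]
  split_ifs <;> simp [cellFold] <;> omega
theorem cellFold_seg (H : Int) (seg : List Char) (hseg : '#' ∉ seg) :
    ∀ (rest : List Char) (y cnt sc : Int),
      cellFold H (seg ++ rest) y cnt sc =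
        cellFold H rest (y + seg.length) (cnt + (seg.count 'O' : Int))
          (sc + runSum H cnt (seg.count 'O')) := by
  induction seg with
  | nil => intro rest y cnt sc; simp [runSum]
  | cons c tl ih =>
    have hc : c ≠ '#' := fun h => hseg (h ▸ List.mem_cons_self)
    have htl : '#' ∉ tl := fun h => hseg (List.mem_cons_of_mem _ h)
    intro rest y cnt sc
    simp only [List.cons_append, cellFold, if_neg hc]
    by_cases hO : c = 'O'
    · subst hO
      rw [ih htl]
      simp only [List.count_cons_self, List.length_cons, runSum]
      congr 1 <;> push_cast [List.length_cons] <;> ring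
    · rw [if_neg hO, ih htl]
      rw [List.count_cons_of_ne (by simpa using hO)]
      congr 1
      push_cast [List.length_cons]
      omega
theorem cellFold_eq_column_load (H : Int) (col : List Char) :
    ∀ (p sc : Int), (cellFold H col p p sc).1 = sc + column_load col H p := by
  have main : ∀ (n : Nat) (col : List Char), col.length = n →
      ∀ p sc : Int, (cellFold H col p p sc).1 = sc + column_load col H p := by
    intro n
    induction n using Nat.strong_induction_on with
    | _ n ihn =>
      intro col hlen p sc
      match h : PySem.List.index? col '#' with
      | none =>
        have hnot : '#' ∉ col := by
          rw [PySem.List.index?_eq_idxOf?] at h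
          simpa [List.idxOf?_eq_none_iff] using h
        have := cellFold_seg H col hnot [] p p sc
        rw [List.append_nil] at this
        rw [this, column_load.eq_def, h]
        simp [cellFold, runSum_eq_segment_load, PySem.List.count_eq]
      | some i =>
        obtain ⟨pre, suf, hcol, hli, hpre⟩ := (PySem.List.index?_eq_some_iff col '#' i).mp h
        have htake : PySem.List.slice col none (some (i : Int)) = pre := by
          rw [PySem.List.slice_to col (by positivity)]
          subst hcol
          simp [← hli]
        have hdrop : PySem.List.slice col (some ((i : Int) + 1)) none = suf := by
          rw [PySem.List.slice_from col (by positivity)]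
          have : ((i : Int) + 1).toNat = pre.length + 1 := by omega
          rw [this]
          subst hcol
          rw [show pre ++ '#' :: suf = (pre ++ ['#']) ++ suf by simp,
            List.drop_left' (by simp)]
        have hsuf : suf.length < n := by
          rw [hcol, List.length_append, List.length_cons] at hlen; omega
        have step1 := cellFold_seg H pre hpre ('#' :: suf) p p sc
        rw [column_load.eq_def, h]
        dsimp only
        rw [htake, hdrop]
        conv_lhs => rw [hcol]
        rw [step1]
        show (cellFold H suf _ _ _).1 = _
        rw [ihn suf.length hsuf suf rfl, runSum_eq_segment_load, PySem.List.count_eq]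
        subst hli
        push_cast
        ring
  exact main col.length col rfl

theorem grid_row (cs : List Char) :
    ∀ (s y : Int) (g : PySem.Dict (Int × Int) Char) (q : Int × Int),
      ((PySem.List.enumerate cs s).foldl (fun g xc => g.insert (xc.1, y) xc.2) g).get? q =
        if q.2 = y ∧ s ≤ q.1 ∧ q.1 < s + cs.length then some (cs.getD (q.1 - s).toNat ' ')
        else g.get? q := by
  induction cs with
  | nil =>
    intro s y g q
    rw [PySem.List.enumerate_nil]
    simp only [List.foldl_nil, List.length_nil, Nat.cast_zero, add_zero]
    rw [if_neg]
    rintro ⟨-, h2, h3⟩; omega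
  | cons c cs ih =>
    intro s y g ⟨qx, qy⟩
    rw [PySem.List.enumerate_cons, List.foldl_cons, ih, PySem.Dict.get?_insert]
    simp only [List.length_cons, Nat.cast_add, Nat.cast_one, Prod.mk.injEq]
    split_ifs with h1 h2 h3 <;> first
      | rfl
      | (exfalso; omega)
      | (have hidx : (qx - s).toNat = (qx - (s+1)).toNat + 1 := by omega
         rw [hidx, List.getD_cons_succ])
      | (have hidx : (qx - s).toNat = 0 := by omega
         rw [hidx, List.getD_cons_zero])
theorem grid_all (data : List String) :
    ∀ (s : Int) (g : PySem.Dict (Int × Int) Char) (q : Int × Int),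
      ((PySem.List.enumerate data s).foldl
          (fun g yl =>
            (PySem.List.enumerate yl.2.toList).foldl
              (fun g xc => g.insert (xc.1, yl.1) xc.2) g) g).get? q =
        if s ≤ q.2 ∧ q.2 < s + data.length ∧ 0 ≤ q.1 ∧
            q.1 < ((data.getD (q.2 - s).toNat "").toList.length : Int) then
          some ((data.getD (q.2 - s).toNat "").toList.getD q.1.toNat ' ')
        else g.get? q := by
  induction data with
  | nil =>
    intro s g q
    rw [PySem.List.enumerate_nil]
    simp only [List.foldl_nil, List.length_nil, Nat.cast_zero, add_zero]
    rw [if_neg]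
    rintro ⟨h1, h2, -⟩; omega
  | cons d rest ih =>
    intro s g ⟨qx, qy⟩
    rw [PySem.List.enumerate_cons, List.foldl_cons, ih, grid_row]
    simp only [List.length_cons, Nat.cast_add, Nat.cast_one]
    rcases lt_trichotomy qy s with hy | hy | hy
    · rw [if_neg (by rintro ⟨h1, -⟩; omega), if_neg (by rintro ⟨h1, -⟩; omega),
        if_neg (by rintro ⟨h1, -⟩; omega)]
    · subst hy
      rw [if_neg (by rintro ⟨h1, -⟩; omega)]
      have h0 : (qy - qy).toNat = 0 := by omega
      rw [h0, List.getD_cons_zero]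
      by_cases hx : 0 ≤ qx ∧ qx < (d.toList.length : Int)
      · rw [if_pos ⟨rfl, hx.1, by omega⟩, if_pos ⟨le_refl _, by omega, hx⟩]
        have hq0 : (qx - 0).toNat = qx.toNat := by omega
        rw [hq0]
      · rw [if_neg (fun h => hx ⟨h.2.1, by omega⟩), if_neg (fun h => hx ⟨h.2.2.1, h.2.2.2⟩)]
    · have hidx : (qy - s).toNat = (qy - (s + 1)).toNat + 1 := by omega
      rw [hidx, List.getD_cons_succ]
      by_cases hy2 : qy < s + 1 + (rest.length : Int)
      · by_cases hx : 0 ≤ qx ∧ qx < ((rest.getD (qy - (s + 1)).toNat "").toList.length : Int)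
        · rw [if_pos ⟨by omega, hy2, hx⟩, if_pos ⟨by omega, by omega, hx⟩]
        · rw [if_neg (fun h => hx ⟨h.2.2.1, h.2.2.2⟩), if_neg (by rintro ⟨h1, -⟩; omega),
            if_neg (fun h => hx ⟨h.2.2.1, h.2.2.2⟩)]
      · rw [if_neg (by rintro ⟨-, h1, -⟩; omega), if_neg (by rintro ⟨h1, -⟩; omega),
          if_neg (by rintro ⟨-, h1, -⟩; omega)]
theorem inner_row (g : PySem.Dict (Int × Int) Char) (H y b : Int) :
    ∀ (n : Nat) (a sc : Int) (cols : PySem.Dict Int Int), (b - a).toNat = n →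
      (((PySem.List.pyRange a b).foldl (xstep g H y) (sc, cols)).1 =
        sc + ((PySem.List.pyRange a b).map
          (fun x => (onecell H y ((g.get? (x, y)).getD ' ') (cols.getD x 0)).1)).sum) ∧
      ∀ z, ((PySem.List.pyRange a b).foldl (xstep g H y) (sc, cols)).2.getD z 0 =
        if a ≤ z ∧ z < b then (onecell H y ((g.get? (z, y)).getD ' ') (cols.getD z 0)).2
        else cols.getD z 0 := by
  intro n
  induction n with
  | zero =>
    intro a sc cols hn
    rw [PySem.List.pyRange_one_eq_nil (by omega)]
    refine ⟨by simp, fun z => ?_⟩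
    rw [if_neg (by rintro ⟨h1, h2⟩; omega)]
    rfl
  | succ n ih =>
    intro a sc cols hn
    have hab : a < b := by omega
    rw [PySem.List.pyRange_one_cons hab]
    simp only [List.foldl_cons, List.map_cons, List.sum_cons]
    have hmap : ∀ cols' : PySem.Dict Int Int, (∀ x, a + 1 ≤ x → cols'.getD x 0 = cols.getD x 0) →
        ((PySem.List.pyRange (a + 1) b).map
          (fun x => (onecell H y ((g.get? (x, y)).getD ' ') (cols'.getD x 0)).1)).sum =
        ((PySem.List.pyRange (a + 1) b).map
          (fun x => (onecell H y ((g.get? (x, y)).getD ' ') (cols.getD x 0)).1)).sum := by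
      intro cols' hc
      refine congrArg List.sum (List.map_congr_left fun x hx => ?_)
      rw [hc x (PySem.List.mem_pyRange_one.mp hx).1]
    by_cases hsh : ((g.get? (a, y)).getD ' ') = '#'
    · have hx1 : xstep g H y (sc, cols) a = (sc, cols.insert a (y + 1)) := by
        simp [xstep, hsh]
      obtain ⟨ih1, ih2⟩ := ih (a + 1) sc (cols.insert a (y + 1)) (by omega)
      rw [hx1]
      constructor
      · rw [ih1, hmap _ (fun x hxa => by rw [PySem.Dict.getD_insert, if_neg (by omega)])]
        have h0 : (onecell H y ((g.get? (a, y)).getD ' ') (cols.getD a 0)).1 = 0 := by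
          simp [onecell, hsh]
        omega
      · intro z
        rw [ih2 z]
        by_cases hz : z = a
        · subst hz
          rw [if_neg (by rintro ⟨h1, -⟩; omega), if_pos ⟨le_refl z, hab⟩,
            PySem.Dict.getD_insert, if_pos rfl]
          simp [onecell, hsh]
        · rw [PySem.Dict.getD_insert, if_neg hz]
          split_ifs with h1 h2 <;> first | rfl | (exfalso; omega)
    · by_cases hsO : ((g.get? (a, y)).getD ' ') = 'O'
      · have hx1 : xstep g H y (sc, cols) a =
            (sc + H - cols.getD a 0, cols.insert a (cols.getD a 0 + 1)) := by
          simp [xstep, hsh, hsO]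
        obtain ⟨ih1, ih2⟩ := ih (a + 1) (sc + H - cols.getD a 0)
          (cols.insert a (cols.getD a 0 + 1)) (by omega)
        rw [hx1]
        constructor
        · rw [ih1, hmap _ (fun x hxa => by rw [PySem.Dict.getD_insert, if_neg (by omega)])]
          have h0 : (onecell H y ((g.get? (a, y)).getD ' ') (cols.getD a 0)).1 = H - cols.getD a 0 := by
            simp [onecell, hsh, hsO]
          omega
        · intro z
          rw [ih2 z]
          by_cases hz : z = a
          · subst hz
            rw [if_neg (by rintro ⟨h1, -⟩; omega), if_pos ⟨le_refl z, hab⟩,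
              PySem.Dict.getD_insert, if_pos rfl]
            simp [onecell, hsh, hsO]
          · rw [PySem.Dict.getD_insert, if_neg hz]
            split_ifs with h1 h2 <;> first | rfl | (exfalso; omega)
      · have hx1 : xstep g H y (sc, cols) a = (sc, cols) := by
          simp [xstep, hsh, hsO]
        obtain ⟨ih1, ih2⟩ := ih (a + 1) sc cols (by omega)
        rw [hx1]
        constructor
        · rw [ih1]
          have h0 : (onecell H y ((g.get? (a, y)).getD ' ') (cols.getD a 0)).1 = 0 := by
            simp [onecell, hsh, hsO]
          omega
        · intro z
          rw [ih2 z]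
          by_cases hz : z = a
          · subst hz
            rw [if_neg (by rintro ⟨h1, -⟩; omega), if_pos ⟨le_refl z, hab⟩]
            simp [onecell, hsh, hsO]
          · split_ifs with h1 h2 <;> first | rfl | (exfalso; omega)

theorem grid_chAt (data : List String) (hpre : Pre_part_1 data) (x y : Int)
    (hx : 0 ≤ x) (hxW : x < Wd data) (hy : 0 ≤ y) (hyH : y < (data.length : Int)) :
    ((gridOf data).get? (x, y)).getD ' ' = chAt data x y := by
  have hlen : 1 ≤ data.length := by omega
  unfold gridOf
  rw [grid_all data 0 PySem.Dict.empty (x, y)]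
  have hy0 : (y - 0).toNat = y.toNat := by omega
  have hyl : y.toNat < data.length := by omega
  have hrow : data.getD (y - 0).toNat "" = data.getD y.toNat "" := by rw [hy0]
  have hmem : data.getD y.toNat "" ∈ data := by
    rw [List.getD_eq_getElem _ _ hyl]
    exact List.getElem_mem hyl
  have hW : Wd data ≤ ((data.getD y.toNat "").toList.length : Int) := by
    have hhead : (data.headD "").length ≤ (data.getD y.toNat "").length :=
      hpre _ hmem
    have hWd : Wd data = ((data.headD "").length : Int) := by
      cases data with
      | nil => simp at hlen
      | cons d rest =>
        simp [Wd, PySem.List.pyGetD_zero_cons, PySem.Str.len_eq]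
    rw [hWd]
    have h1 : (data.headD "").toList.length = (data.headD "").length := by simp
    have h2 : (data.getD y.toNat "").toList.length = (data.getD y.toNat "").length := by simp
    omega
  rw [if_pos ⟨hy, by omega, hx, by rw [hrow]; omega⟩]
  unfold chAt
  rw [show y = ((y.toNat : Nat) : Int) by omega, PySem.List.pyGetD_natCast,
    show x = ((x.toNat : Nat) : Int) by omega, PySem.Str.pyGet?_natCast]
  have hxl : x.toNat < (data.getD y.toNat "").toList.length := by omega
  rw [List.getElem?_eq_getElem hxl]
  simp only [Option.getD_some]
  rw [show ((((x.toNat : Nat) : Int), ((y.toNat : Nat) : Int)).2 - 0).toNat = y.toNat by omega]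
  rw [show (((x.toNat : Nat) : Int), ((y.toNat : Nat) : Int)).1.toNat = x.toNat from by omega]
  rw [List.getD_eq_getElem _ _ hxl]

theorem cellFold_snoc (data : List String) (n : Nat) (x : Int) (H : Int) :
    cellFold H (colOf data (n + 1) x) 0 0 0 =
      (((cellFold H (colOf data n x) 0 0 0).1 +
          (onecell H (n : Int) (chAt data x (n : Int)) (cellFold H (colOf data n x) 0 0 0).2).1),
        (onecell H (n : Int) (chAt data x (n : Int)) (cellFold H (colOf data n x) 0 0 0).2).2) := by
  have h1 : colOf data (n + 1) x = colOf data n x ++ [chAt data x (n : Int)] := by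
    unfold colOf
    rw [show ((n + 1 : Nat) : Int) = (n : Int) + 1 by push_cast; ring,
      PySem.List.pyRange_one_succ_right (by positivity), List.map_append, List.map_singleton]
  have h2 : ((colOf data n x).length : Int) = (n : Int) := by
    have : (colOf data n x).length = n := by
      simp [colOf, PySem.List.length_pyRange_one]
    rw [this]
  rw [h1, cellFold_append, h2, zero_add, cellFold_single]

-- the outer (over y) loop of A
theorem outer_loop (data : List String) (hpre : Pre_part_1 data) :
    ∀ (n : Nat), n ≤ data.length →
      (((PySem.List.pyRange 0 (n : Int)).foldl (rowBody data) (0, PySem.Dict.empty)).1 =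
        ((PySem.List.pyRange 0 (Wd data)).map
          (fun x => (cellFold (data.length : Int) (colOf data n x) 0 0 0).1)).sum) ∧
      ∀ z, ((PySem.List.pyRange 0 (n : Int)).foldl (rowBody data) (0, PySem.Dict.empty)).2.getD z 0 =
        if 0 ≤ z ∧ z < Wd data then (cellFold (data.length : Int) (colOf data n z) 0 0 0).2
        else 0 := by
  intro n
  induction n with
  | zero =>
    intro hn
    rw [Nat.cast_zero, PySem.List.pyRange_one_eq_nil (le_refl 0)]
    constructor
    · simp [colOf, PySem.List.pyRange_one_eq_nil, cellFold]
    · intro z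
      split_ifs <;> simp [colOf, PySem.List.pyRange_one_eq_nil, cellFold, PySem.Dict.getD_empty]
  | succ n ihn =>
    intro hn
    obtain ⟨ih1, ih2⟩ := ihn (by omega)
    rw [show ((n + 1 : Nat) : Int) = (n : Int) + 1 by push_cast; ring,
      PySem.List.pyRange_one_succ_right (by positivity), List.foldl_append, List.foldl_cons,
      List.foldl_nil]
    have hnlen : (n : Int) < (data.length : Int) := by exact_mod_cast hn
    obtain ⟨r1, r2⟩ := inner_row (gridOf data) (data.length : Int) (n : Int) (Wd data)
      (Wd data - 0).toNat 0
      ((PySem.List.pyRange 0 (n : Int)).foldl (rowBody data) (0, PySem.Dict.empty)).1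
      ((PySem.List.pyRange 0 (n : Int)).foldl (rowBody data) (0, PySem.Dict.empty)).2 rfl
    constructor
    · show ((PySem.List.pyRange 0 (Wd data)).foldl (xstep (gridOf data) (data.length : Int) (n : Int)) _).1 = _
      rw [r1, ih1]
      have hcongr : ∀ x, x ∈ PySem.List.pyRange 0 (Wd data) →
          (onecell (data.length : Int) (n : Int)
              (((gridOf data).get? (x, (n : Int))).getD ' ')
              (((PySem.List.pyRange 0 (n : Int)).foldl (rowBody data)
                  (0, PySem.Dict.empty)).2.getD x 0)).1 =
            (onecell (data.length : Int) (n : Int) (chAt data x (n : Int))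
              (cellFold (data.length : Int) (colOf data n x) 0 0 0).2).1 := by
        intro x hxmem
        obtain ⟨hx0, hxW⟩ := PySem.List.mem_pyRange_one.mp hxmem
        rw [grid_chAt data hpre x (n : Int) hx0 hxW (by positivity) hnlen,
          ih2 x, if_pos ⟨hx0, hxW⟩]
      rw [List.map_congr_left hcongr]
      have hsnoc : ∀ x, x ∈ PySem.List.pyRange 0 (Wd data) →
          (cellFold (data.length : Int) (colOf data (n + 1) x) 0 0 0).1 =
            (cellFold (data.length : Int) (colOf data n x) 0 0 0).1 +
              (onecell (data.length : Int) (n : Int) (chAt data x (n : Int))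
                (cellFold (data.length : Int) (colOf data n x) 0 0 0).2).1 := by
        intro x hxmem
        rw [cellFold_snoc]
      rw [List.map_congr_left hsnoc]
      rw [show (fun x => (cellFold (data.length : Int) (colOf data n x) 0 0 0).1 +
            (onecell (data.length : Int) (n : Int) (chAt data x (n : Int))
              (cellFold (data.length : Int) (colOf data n x) 0 0 0).2).1) =
          (fun x => ((fun x => (cellFold (data.length : Int) (colOf data n x) 0 0 0).1) x) +
            ((fun x => (onecell (data.length : Int) (n : Int) (chAt data x (n : Int))
              (cellFold (data.length : Int) (colOf data n x) 0 0 0).2).1) x)) from rfl]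
      rw [List.sum_map_add]
    · intro z
      show (((PySem.List.pyRange 0 (Wd data)).foldl
          (xstep (gridOf data) (data.length : Int) (n : Int)) _).2.getD z 0) = _
      rw [r2 z]
      by_cases hz : 0 ≤ z ∧ z < Wd data
      · rw [if_pos hz, if_pos hz, ih2 z, if_pos hz,
          grid_chAt data hpre z (n : Int) hz.1 hz.2 (by positivity) hnlen, cellFold_snoc]
      · rw [if_neg hz, if_neg hz, ih2 z, if_neg hz]

-- ===== VERDICT (by name: the statement is the Claim_ definition above) =====
theorem part_1_spec : Claim_equal_part_1 := by
  intro data _hdom hpre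
  show part_1 data = part_1_alt data
  by_cases hnil : data = []
  · subst hnil; rfl
  · have hlen : 0 < data.length := List.length_pos_iff.mpr hnil
    rw [part_1_eq]
    obtain ⟨o1, -⟩ := outer_loop data hpre data.length (le_refl _)
    rw [o1]
    have hb : part_1_alt data =
        0 + ((PySem.List.pyRange 0 (Wd data)).map
          (fun x => column_load (colOf data data.length x) (data.length : Int) 0)).sum := by
      unfold part_1_alt
      rw [if_neg hnil]
      exact PySem.List.foldl_add _ _ _
    rw [hb, zero_add]
    refine congrArg List.sum (List.map_congr_left fun x hx => ?_)
    rw [cellFold_eq_column_load, zero_add]
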